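-- pv_equiv track=rewrite | github.com/thelua/puzzle-15 | script.py | verificar
-- ===== SOURCE A (Python) =====
-- def verificar(estado):
--     valor_esperado = 0
--     for linha in estado:
--         for valor in linha:
--             if valor != valor_esperado:
--                 return False
--             valor_esperado += 1
--     return True
-- ===== SOURCE B (Python) =====
-- def verificar(estado):
--     flat = [valor for linha in estado for valor in linha]
--     return flat == list(range(len(flat)))
-- ===== Notes on version B (the rewrite author's own statement) =====
-- stated objective: simpler
-- what changed: Replaces the counter-threaded nested loops with early return by flattening the grid once and comparing it against the closed-form expected sequence list(range(len(flat))) in one equality.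
import Mathlib
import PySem

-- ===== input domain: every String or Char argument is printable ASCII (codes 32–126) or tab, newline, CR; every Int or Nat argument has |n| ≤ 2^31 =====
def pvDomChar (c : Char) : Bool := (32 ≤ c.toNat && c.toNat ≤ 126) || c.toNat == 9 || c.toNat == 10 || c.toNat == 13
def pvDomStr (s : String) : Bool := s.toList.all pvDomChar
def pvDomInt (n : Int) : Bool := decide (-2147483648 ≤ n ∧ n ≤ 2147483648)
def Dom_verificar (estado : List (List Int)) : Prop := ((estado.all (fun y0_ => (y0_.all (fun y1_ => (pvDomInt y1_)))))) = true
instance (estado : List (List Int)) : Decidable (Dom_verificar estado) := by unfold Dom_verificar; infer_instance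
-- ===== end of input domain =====

-- B flattens the grid once and compares it to the closed-form expected sequence list(range(len(flat))),
-- replacing A's counter-threaded nested loops with early return (objective: simpler).


-- ===== PORT A =====
-- inner loop over one row: threads the counter; `none` is the early `return False`
def verificarRow (linha : List Int) (esperado : Int) : Option Int :=
  match linha with
  | [] => some esperado
  | valor :: resto => if valor ≠ esperado then none else verificarRow resto (esperado + 1)

-- outer loop over the rows of the grid
def verificarAux (estado : List (List Int)) (esperado : Int) : Bool :=
  match estado with
  | [] => true
  | linha :: resto =>
    match verificarRow linha esperado with
    | none => false
    | some e' => verificarAux resto e'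

def verificar (estado : List (List Int)) : Bool := verificarAux estado 0

-- ===== PORT B =====
-- flat = [v for linha in estado for v in linha]; return flat == list(range(len(flat)))
def verificar_alt (estado : List (List Int)) : Bool :=
  let flat := estado.flatMap (fun linha => linha)
  flat == (List.range flat.length).map (fun i : Nat => (i : Int))

-- ===== PRECONDITION & SPEC =====
def Spec_verificar (estado : List (List Int)) (out : Bool) : Prop := out = verificar_alt estado
instance (estado : List (List Int)) (out : Bool) : Decidable (Spec_verificar estado out) := by unfold Spec_verificar; infer_instance

-- ===== CLAIM (what is proved, stated in full; the proofs are below) =====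
def Claim_equal_verificar : Prop := ∀ (estado : List (List Int)), Dom_verificar estado → Spec_verificar estado (verificar estado)

-- ===== LEMMAS AND PROOFS =====

theorem consec_cons (e : Int) (n : Nat) :
    (List.range (n+1)).map (fun i : Nat => e + i) = e :: (List.range n).map (fun i : Nat => (e+1) + i) := by
  rw [List.range_succ_eq_map, List.map_cons, List.map_map]
  refine congrArg₂ List.cons (by simp) (List.map_congr_left fun i _ => ?_)
  simp [Function.comp, Nat.succ_eq_add_one]
  ring

theorem verificarRow_eq (l : List Int) (e : Int) :
    verificarRow l e =
      if l = (List.range l.length).map (fun i : Nat => e + i) then some (e + l.length) else none := by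
  induction l generalizing e with
  | nil => simp [verificarRow]
  | cons v t ih =>
    have hcons : (v :: t = (List.range (v :: t).length).map (fun i : Nat => e + i)) ↔
        (v = e ∧ t = (List.range t.length).map (fun i : Nat => (e+1) + i)) := by
      rw [List.length_cons, consec_cons, List.cons_eq_cons]
    simp only [verificarRow, ih, ne_eq, ite_not]
    by_cases hv : v = e
    · subst hv
      by_cases ht : t = (List.range t.length).map (fun i : Nat => (v+1) + i)
      · rw [if_pos rfl, if_pos ht, if_pos (hcons.mpr ⟨rfl, ht⟩), List.length_cons]
        congr 1; push_cast; ring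
      · rw [if_pos rfl, if_neg ht, if_neg (fun h => ht (hcons.mp h).2)]
    · rw [if_neg hv, if_neg (fun h => hv (hcons.mp h).1)]

theorem consec_append (e : Int) (l F : List Int) :
    (l ++ F = (List.range (l.length + F.length)).map (fun i : Nat => e + i)) ↔
    (l = (List.range l.length).map (fun i : Nat => e + i) ∧
     F = (List.range F.length).map (fun i : Nat => (e + l.length) + i)) := by
  rw [List.range_add, List.map_append, List.map_map]
  have hmap : (List.range F.length).map ((fun i : Nat => e + i) ∘ (fun i => l.length + i))
      = (List.range F.length).map (fun i : Nat => (e + l.length) + i) := by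
    refine List.map_congr_left fun i _ => ?_
    simp [Function.comp]; ring
  rw [hmap]
  constructor
  · intro h
    exact List.append_inj h (by simp)
  · rintro ⟨h1, h2⟩
    exact congrArg₂ (· ++ ·) h1 h2

theorem verificarAux_eq (estado : List (List Int)) (e : Int) :
    verificarAux estado e =
      decide (estado.flatMap (fun l => l)
        = (List.range (estado.flatMap (fun l => l)).length).map (fun i : Nat => e + i)) := by
  induction estado generalizing e with
  | nil => simp [verificarAux]
  | cons l rest ih =>
    simp only [verificarAux, verificarRow_eq, List.flatMap_cons, List.length_append]
    by_cases hl : l = (List.range l.length).map (fun i : Nat => e + i)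
    · rw [if_pos hl]
      show verificarAux rest (e + (l.length : Int)) = _
      rw [ih]
      congr 1
      rw [eq_iff_iff, consec_append]
      exact ⟨fun h => ⟨hl, h⟩, fun h => h.2⟩
    · rw [if_neg hl]
      show false = _
      symm
      simp only [decide_eq_false_iff_not]
      intro h
      exact hl ((consec_append e l _).mp h).1

-- ===== VERDICT (by name: the statement is the Claim_ definition above) =====
theorem verificar_spec : Claim_equal_verificar := by
  intro estado _
  unfold Spec_verificar verificar verificar_alt
  rw [verificarAux_eq]
  have : (List.range (List.flatMap (fun l => l) estado).length).map (fun i : Nat => (0 : Int) + i)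
      = (List.range (List.flatMap (fun l => l) estado).length).map (fun i : Nat => (i : Int)) := by
    exact List.map_congr_left fun i _ => by simp
  rw [this]
  exact Eq.symm (Bool.beq_eq_decide_eq _ _)
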